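-- pv_equiv track=rewrite | github.com/danmazus/FCM | my_package/functions_storage.py | combine_upper_lower
-- ===== SOURCE A (Python) =====
-- def combine_upper_lower(L, U, n):
--     LU = [[0] * n for i in range(n)]
--     for i in range(n):
--         for k in range(n):
--             # Pulling elements out of ULT and storing them in LU below the diagonal
--             if i > k:
--                 LU[i][k] = L[i][k]
--             # Pulling elements out of UUT and storing them in LU on and above the diagonal
--             else:
--                 LU[i][k] = U[i][k]
--
--     return LU
-- ===== SOURCE B (Python) =====
-- def combine_upper_lower(L, U, n):
--     # Row-wise: first i entries from L, entries i..n-1 from U, split at the diagonal.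
--     return [L[i][:i] + U[i][i:n] for i in range(n)]
-- ===== Notes on version B (the rewrite author's own statement) =====
-- stated objective: simpler
-- what changed: Builds the result row by row as the slice concatenation L[i][:i] + U[i][i:n] in a single comprehension, replacing the nested element-by-element loop with its i>k branch and the pre-allocated zero matrix.
-- outside the precondition, e.g. on combine_upper_lower([], [[5]], 1): A returns [[5]], B raises IndexError
import Mathlib
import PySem

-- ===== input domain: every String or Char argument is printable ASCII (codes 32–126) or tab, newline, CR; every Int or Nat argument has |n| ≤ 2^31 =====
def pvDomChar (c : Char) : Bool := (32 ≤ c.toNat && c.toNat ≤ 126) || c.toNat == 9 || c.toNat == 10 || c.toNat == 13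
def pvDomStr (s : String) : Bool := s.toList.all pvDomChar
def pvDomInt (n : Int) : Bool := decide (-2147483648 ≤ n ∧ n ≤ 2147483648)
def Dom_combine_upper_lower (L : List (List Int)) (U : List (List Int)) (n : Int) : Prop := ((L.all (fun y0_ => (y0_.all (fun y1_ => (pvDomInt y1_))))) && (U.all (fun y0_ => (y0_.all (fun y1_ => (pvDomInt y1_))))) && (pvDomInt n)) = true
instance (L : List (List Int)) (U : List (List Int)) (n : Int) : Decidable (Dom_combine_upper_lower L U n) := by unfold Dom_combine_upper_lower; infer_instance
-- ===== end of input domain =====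

-- B builds each result row by slice concatenation (simpler decomposition); equal to A on Pre_.

-- ===== PORT A =====
def combine_upper_lower (L : List (List Int)) (U : List (List Int)) (n : Int) : List (List Int) :=
  let LU : List (List Int) := (PySem.List.pyRange 0 n 1).map (fun _ => List.replicate n.toNat (0 : Int))
  (PySem.List.pyRange 0 n 1).foldl (fun LU i =>
    (PySem.List.pyRange 0 n 1).foldl (fun LU k =>
      PySem.List.pySetD LU i (PySem.List.pySetD (PySem.List.pyGetD LU i []) k
        (if i > k then PySem.List.pyGetD (PySem.List.pyGetD L i []) k 0
         else PySem.List.pyGetD (PySem.List.pyGetD U i []) k 0))) LU) LU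

-- ===== PORT B =====
def combine_upper_lower_alt (L : List (List Int)) (U : List (List Int)) (n : Int) : List (List Int) :=
  (PySem.List.pyRange 0 n 1).map (fun i =>
    PySem.List.slice (PySem.List.pyGetD L i []) none (some i)
      ++ PySem.List.slice (PySem.List.pyGetD U i []) (some i) (some n))

-- ===== PRECONDITION & SPEC =====
-- Pre_ excludes inputs where A raises IndexError (a needed L/U row missing or too short), and
-- additionally the corner n ≥ 1 with L = [], where A returns without ever reading L but B's
-- row construction indexes L[0] and raises.
def Pre_combine_upper_lower (L : List (List Int)) (U : List (List Int)) (n : Int) : Prop :=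
  n.toNat ≤ L.length ∧ n.toNat ≤ U.length ∧
    ∀ i < n.toNat, i ≤ (L.getD i []).length ∧ n.toNat ≤ (U.getD i []).length
instance (L : List (List Int)) (U : List (List Int)) (n : Int) : Decidable (Pre_combine_upper_lower L U n) := by unfold Pre_combine_upper_lower; infer_instance

def pvWitness_combine_upper_lower : List (List Int) × List (List Int) × Int :=
  ([[9], [1, 2]], [[3, 4], [5, 6]], 2)

def Spec_combine_upper_lower (L : List (List Int)) (U : List (List Int)) (n : Int) (out : List (List Int)) : Prop := out = combine_upper_lower_alt L U n
instance (L : List (List Int)) (U : List (List Int)) (n : Int) (out : List (List Int)) : Decidable (Spec_combine_upper_lower L U n out) := by unfold Spec_combine_upper_lower; infer_instance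

-- ===== CLAIM (what is proved, stated in full; the proofs are below) =====
def Claim_equal_combine_upper_lower : Prop := ∀ (L : List (List Int)) (U : List (List Int)) (n : Int), Dom_combine_upper_lower L U n → Pre_combine_upper_lower L U n → Spec_combine_upper_lower L U n (combine_upper_lower L U n)

-- ===== LEMMAS AND PROOFS =====

-- the element written by A at position (i, k)
def pvG (L U : List (List Int)) (i k : Nat) : Int :=
  if k < i then (L.getD i []).getD k 0 else (U.getD i []).getD k 0

-- the row A ends up with at index i (matrix size m)
def pvRow (L U : List (List Int)) (m i : Nat) : List Int :=
  (List.range m).map (pvG L U i)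

-- factor the inner loop: all its sets hit row i only
theorem pv_inner_factor (f : Nat → Int) (ks : List Nat) :
    ∀ (M : List (List Int)) (i : Nat), i < M.length →
    ks.foldl (fun A k => A.set i ((A.getD i []).set k (f k))) M
      = M.set i (ks.foldl (fun r k => r.set k (f k)) (M.getD i [])) := by
  induction ks with
  | nil =>
    intro M i hi
    simp [List.getD, List.getElem?_eq_getElem hi, List.set_getElem_self]
  | cons k ks ih =>
    intro M i hi
    simp only [List.foldl_cons]
    rw [ih _ i (by simpa using hi)]
    simp [hi, List.getElem_set_self, List.set_set]

-- filling a prefix by repeated set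
theorem pv_fill (f : Nat → Int) :
    ∀ (m : Nat) (row : List Int), m ≤ row.length →
    (List.range m).foldl (fun r k => r.set k (f k)) row
      = (List.range m).map f ++ row.drop m := by
  intro m
  induction m with
  | zero => intro row _; simp
  | succ m ih =>
    intro row h
    have hm : m < row.length := by omega
    rw [List.range_succ, List.foldl_append, ih row (by omega)]
    have hdrop : row.drop m = row[m] :: row.drop (m + 1) :=
      List.drop_eq_getElem_cons hm
    simp only [List.foldl_cons, List.foldl_nil, List.map_append,
      List.map_cons, List.map_nil]
    rw [hdrop]
    rw [List.set_append_right _ _ (by simp)]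
    simp only [List.length_map, List.length_range, Nat.sub_self, List.set_cons_zero]
    simp

-- the outer loop fills the matrix row by row
theorem pv_outer (L U : List (List Int)) (m : Nat) :
    ∀ (j : Nat) (M : List (List Int)), j ≤ M.length → (∀ r ∈ M, r.length = m) →
    (List.range j).foldl (fun A i =>
        (List.range m).foldl (fun A k => A.set i ((A.getD i []).set k (pvG L U i k))) A) M
      = (List.range j).map (pvRow L U m) ++ M.drop j := by
  intro j
  induction j with
  | zero => intro M _ _; simp
  | succ j ih =>
    intro M hj hr
    have hjM : j < M.length := by omega
    have hMjm : (M[j]).length = m := hr _ (List.getElem_mem hjM)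
    rw [List.range_succ, List.foldl_append, ih M (by omega) hr]
    simp only [List.foldl_cons, List.foldl_nil]
    have hget : (((List.range j).map (pvRow L U m)) ++ M.drop j).getD j [] = M[j] := by
      rw [List.getD_eq_getElem _ _ (by simp; omega)]
      rw [List.getElem_append_right (by simp)]
      simp
    rw [pv_inner_factor _ _ _ j (by simp; omega), hget,
      pv_fill _ m M[j] (le_of_eq hMjm.symm),
      List.drop_eq_nil_iff.mpr (le_of_eq hMjm), List.append_nil,
      List.drop_eq_getElem_cons hjM,
      List.set_append_right _ _ (by simp)]
    simp only [List.length_map, List.length_range, Nat.sub_self, List.set_cons_zero]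
    simp [pvRow]

-- characterisation of port A (unconditional)
theorem pv_A_char (L U : List (List Int)) (n : Int) :
    combine_upper_lower L U n = (List.range n.toNat).map (pvRow L U n.toNat) := by
  unfold combine_upper_lower
  rw [PySem.List.pyRange_one]
  simp only [Int.sub_zero, List.foldl_map, List.map_map, zero_add,
    PySem.List.pySetD_natCast, PySem.List.pyGetD_natCast, gt_iff_lt, Nat.cast_lt]
  have h := pv_outer L U n.toNat n.toNat
      (List.map ((fun _ => List.replicate n.toNat (0:Int)) ∘ fun k : Nat => (k:Int)) (List.range n.toNat))
      (by simp) (by intro r hr; simp at hr; simp [← hr.2])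
  simp only [pvG] at h
  rw [h]
  simp

-- B's row equals A's row under Pre_
theorem pv_row_eq (Lr Ur : List Int) (m i : Nat) (him : i < m)
    (hL : i ≤ Lr.length) (hU : m ≤ Ur.length) :
    Lr.take i ++ (Ur.drop i).take (m - i)
      = (List.range m).map (fun k => if k < i then Lr.getD k 0 else Ur.getD k 0) := by
  apply List.ext_getElem
  · simp; omega
  · intro j hj hj'
    have hjm : j < m := by simpa using hj'
    rw [List.getElem_map, List.getElem_range]
    by_cases hji : j < i
    · rw [List.getElem_append_left (by simp; omega)]
      rw [List.getElem_take, if_pos hji, List.getD_eq_getElem _ _ (by omega)]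
    · rw [List.getElem_append_right (by simp; omega)]
      rw [List.getElem_take, List.getElem_drop, if_neg hji,
        List.getD_eq_getElem _ _ (by omega)]
      congr 1
      simp
      omega

-- ===== VERDICT (by name: the statement is the Claim_ definition above) =====
theorem combine_upper_lower_spec : Claim_equal_combine_upper_lower := by
  intro L U n _ hpre
  unfold Spec_combine_upper_lower
  rw [pv_A_char]
  unfold combine_upper_lower_alt
  rw [PySem.List.pyRange_one]
  simp only [Int.sub_zero, List.map_map]
  apply List.map_congr_left
  intro i hi
  simp only [Function.comp]
  have him : i < n.toNat := List.mem_range.mp hi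
  obtain ⟨hLn, hUn, hrow⟩ := hpre
  obtain ⟨hLl, hUl⟩ := hrow i him
  have hn : (n : Int) = (n.toNat : Int) := by
    have : 0 < n.toNat := by omega
    omega
  rw [hn]
  simp only [zero_add, PySem.List.pyGetD_natCast]
  rw [PySem.List.slice_to_natCast, PySem.List.slice_natCast]
  rw [pv_row_eq _ _ n.toNat i him hLl hUl]
  simp only [pvRow]
  rfl
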